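-- pv_equiv track=rewrite | github.com/codebuff/spelling-correction | spell-correction/preprocessing/utilities.py | get_indexes_list
-- ===== SOURCE A (Python) =====
-- def get_indexes_list(sorted_linear_dictionary):
--     """
--     :return:a list which contains positions at which length of word changes
--     in size sorted word_list
--     """
--     indexes = {}
--     length = 0
--     for pos in range(len(sorted_linear_dictionary)):
--         if len(sorted_linear_dictionary[pos]) > length:
--             indexes[len(sorted_linear_dictionary[pos])] = pos
--         length = len(sorted_linear_dictionary[pos])
--     return indexes
-- ===== SOURCE B (Python) =====
-- def get_indexes_list(sorted_linear_dictionary):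
--     """
--     :return: dict mapping word length -> position where the length first
--     exceeds the previous word's length in the size-sorted word list
--     """
--     # Phase 1: group the list into maximal runs of equal word length,
--     # recording each run as (start position, word length).
--     runs = []
--     prev_len = None
--     for i, word in enumerate(sorted_linear_dictionary):
--         if len(word) != prev_len:
--             prev_len = len(word)
--             runs.append((i, prev_len))
--     # Phase 2: walk the runs; whenever a run's length strictly exceeds the
--     # previous run's length (baseline 0), record its starting position.
--     indexes = {}
--     prev = 0
--     for start, length in runs:
--         if length > prev:
--             indexes[length] = start
--         prev = length
--     return indexes
-- ===== Notes on version B (the rewrite author's own statement) =====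
-- stated objective: alternative
-- what changed: B first run-length-groups the list into maximal runs of equal word length (start,length) and then walks the run list comparing each run's length with the previous run's, instead of A's single per-element loop over range(len) that compares each word with its predecessor; only run boundaries reach the dict-building phase.
import Mathlib
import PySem

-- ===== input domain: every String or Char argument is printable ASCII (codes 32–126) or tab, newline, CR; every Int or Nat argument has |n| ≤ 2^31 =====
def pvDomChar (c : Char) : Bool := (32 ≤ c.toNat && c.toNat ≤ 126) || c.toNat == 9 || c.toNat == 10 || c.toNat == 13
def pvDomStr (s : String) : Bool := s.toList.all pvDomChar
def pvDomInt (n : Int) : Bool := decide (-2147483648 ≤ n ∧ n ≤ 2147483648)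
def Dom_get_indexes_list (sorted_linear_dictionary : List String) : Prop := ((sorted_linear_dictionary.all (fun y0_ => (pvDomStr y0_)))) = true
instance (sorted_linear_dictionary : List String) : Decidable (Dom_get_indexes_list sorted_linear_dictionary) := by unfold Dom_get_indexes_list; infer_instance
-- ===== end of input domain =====

-- B re-implements A by run-length-grouping the list into maximal runs of equal
-- word length and then walking the run list (objective: alternative decomposition).


-- ===== PORT A =====
-- for pos in range(len(xs)): if len(xs[pos]) > length: indexes[len(xs[pos])] = pos; length = len(xs[pos])
def get_indexes_list (sorted_linear_dictionary : List String) : List (Int × Int) :=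
  ((PySem.List.pyRange 0 (PySem.List.len sorted_linear_dictionary) 1).foldl
      (fun (st : PySem.Dict Int Int × Int) pos =>
        let w := PySem.List.pyGetD sorted_linear_dictionary pos ""
        ( if PySem.Str.len w > st.2 then st.1.insert (PySem.Str.len w) pos else st.1,
          PySem.Str.len w))
      (PySem.Dict.empty, 0)).1.items

-- ===== PORT B =====
def get_indexes_list_alt (sorted_linear_dictionary : List String) : List (Int × Int) :=
  -- Phase 1: maximal runs of equal word length, as (start position, length)
  let runs : List (Int × Int) :=
    ((PySem.List.enumerate sorted_linear_dictionary).foldl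
        (fun (st : List (Int × Int) × Option Int) iw =>
          if some (PySem.Str.len iw.2) ≠ st.2 then
            (st.1 ++ [(iw.1, PySem.Str.len iw.2)], some (PySem.Str.len iw.2))
          else st)
        ([], none)).1
  -- Phase 2: record runs whose length exceeds the previous run's (baseline 0)
  (runs.foldl
      (fun (st : PySem.Dict Int Int × Int) r =>
        (if r.2 > st.2 then st.1.insert r.2 r.1 else st.1, r.2))
      (PySem.Dict.empty, 0)).1.items

-- ===== PRECONDITION & SPEC =====
def Spec_get_indexes_list (sorted_linear_dictionary : List String) (out : List (Int × Int)) : Prop := out = get_indexes_list_alt sorted_linear_dictionary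
instance (sorted_linear_dictionary : List String) (out : List (Int × Int)) : Decidable (Spec_get_indexes_list sorted_linear_dictionary out) := by unfold Spec_get_indexes_list; infer_instance

-- ===== CLAIM (what is proved, stated in full; the proofs are below) =====
def Claim_equal_get_indexes_list : Prop := ∀ (sorted_linear_dictionary : List String), Dom_get_indexes_list sorted_linear_dictionary → Spec_get_indexes_list sorted_linear_dictionary (get_indexes_list sorted_linear_dictionary)

-- ===== LEMMAS AND PROOFS =====

-- recursive form of A's loop over (position, word) pairs
def pvGoA (t : List (Int × String)) (d : PySem.Dict Int Int) (p : Int) : PySem.Dict Int Int :=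
  match t with
  | [] => d
  | (i, w) :: t =>
    pvGoA t (if PySem.Str.len w > p then d.insert (PySem.Str.len w) i else d) (PySem.Str.len w)

-- recursive form of B's phase 1 (runs), parametrised by the previous length
def pvRuns (t : List (Int × String)) (pl : Option Int) : List (Int × Int) :=
  match t with
  | [] => []
  | (i, w) :: t =>
    if some (PySem.Str.len w) ≠ pl then
      (i, PySem.Str.len w) :: pvRuns t (some (PySem.Str.len w))
    else pvRuns t (some (PySem.Str.len w))

-- recursive form of B's phase 2
def pvPh2 (rs : List (Int × Int)) (d : PySem.Dict Int Int) (q : Int) : PySem.Dict Int Int :=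
  match rs with
  | [] => d
  | (s, l) :: rs => pvPh2 rs (if l > q then d.insert l s else d) l

theorem pvFoldA_eq (xs : List String) (js : List Int) (d : PySem.Dict Int Int) (p : Int) :
    (js.foldl
        (fun (st : PySem.Dict Int Int × Int) pos =>
          let w := PySem.List.pyGetD xs pos ""
          ( if PySem.Str.len w > st.2 then st.1.insert (PySem.Str.len w) pos else st.1,
            PySem.Str.len w))
        (d, p)).1 = pvGoA (js.map (fun j => (j, PySem.List.pyGetD xs j ""))) d p := by
  induction js generalizing d p with
  | nil => rfl
  | cons h t ih => exact ih _ _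

theorem pvFold1_eq (t : List (Int × String)) (acc : List (Int × Int)) (pl : Option Int) :
    (t.foldl
        (fun (st : List (Int × Int) × Option Int) iw =>
          if some (PySem.Str.len iw.2) ≠ st.2 then
            (st.1 ++ [(iw.1, PySem.Str.len iw.2)], some (PySem.Str.len iw.2))
          else st)
        (acc, pl)).1 = acc ++ pvRuns t pl := by
  induction t generalizing acc pl with
  | nil => simp [pvRuns]
  | cons h t ih =>
    obtain ⟨i, w⟩ := h
    show (List.foldl _
        (if some (PySem.Str.len w) ≠ pl then
          (acc ++ [(i, PySem.Str.len w)], some (PySem.Str.len w))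
        else (acc, pl)) t).1 = acc ++ pvRuns ((i, w) :: t) pl
    by_cases hc : some (PySem.Str.len w) = pl
    · rw [if_neg (not_not_intro hc),
        show pvRuns ((i, w) :: t) pl = pvRuns t (some (PySem.Str.len w)) from by
          simp only [pvRuns]; rw [if_neg (not_not_intro hc)]]
      subst hc
      exact ih _ _
    · rw [if_pos hc,
        show pvRuns ((i, w) :: t) pl
            = (i, PySem.Str.len w) :: pvRuns t (some (PySem.Str.len w)) from by
          simp only [pvRuns]; rw [if_pos hc],
        ih]
      simp

theorem pvFold2_eq (rs : List (Int × Int)) (d : PySem.Dict Int Int) (q : Int) :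
    (rs.foldl
        (fun (st : PySem.Dict Int Int × Int) r =>
          (if r.2 > st.2 then st.1.insert r.2 r.1 else st.1, r.2))
        (d, q)).1 = pvPh2 rs d q := by
  induction rs generalizing d q with
  | nil => rfl
  | cons h t ih =>
    obtain ⟨s, l⟩ := h
    exact ih _ _

theorem pvMain (t : List (Int × String)) (p : Int) (d : PySem.Dict Int Int) :
    pvGoA t d p = pvPh2 (pvRuns t (some p)) d p := by
  induction t generalizing p d with
  | nil => rfl
  | cons h t ih =>
    obtain ⟨i, w⟩ := h
    by_cases hc : PySem.Str.len w = p
    · have hgt : ¬ PySem.Str.len w > p := by omega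
      rw [show pvGoA ((i, w) :: t) d p = pvGoA t d (PySem.Str.len w) from by
            simp only [pvGoA, if_neg hgt],
          show pvRuns ((i, w) :: t) (some p) = pvRuns t (some (PySem.Str.len w)) from by
            simp only [pvRuns]; rw [if_neg (not_not_intro (by rw [hc]))],
          ih, hc]
    · rw [show pvGoA ((i, w) :: t) d p
            = pvGoA t (if PySem.Str.len w > p then d.insert (PySem.Str.len w) i else d)
                (PySem.Str.len w) from by simp only [pvGoA],
          show pvRuns ((i, w) :: t) (some p)
            = (i, PySem.Str.len w) :: pvRuns t (some (PySem.Str.len w)) from by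
            simp only [pvRuns]; rw [if_pos (fun he => hc (Option.some_injective _ he))],
          show pvPh2 ((i, PySem.Str.len w) :: pvRuns t (some (PySem.Str.len w))) d p
            = pvPh2 (pvRuns t (some (PySem.Str.len w)))
                (if PySem.Str.len w > p then d.insert (PySem.Str.len w) i else d)
                (PySem.Str.len w) from by simp only [pvPh2]]
      exact ih _ _

theorem pvInit (t : List (Int × String)) (d : PySem.Dict Int Int) :
    pvGoA t d 0 = pvPh2 (pvRuns t none) d 0 := by
  cases t with
  | nil => rfl
  | cons h t =>
    obtain ⟨i, w⟩ := h
    rw [show pvGoA ((i, w) :: t) d 0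
          = pvGoA t (if PySem.Str.len w > 0 then d.insert (PySem.Str.len w) i else d)
              (PySem.Str.len w) from by simp only [pvGoA],
        show pvRuns ((i, w) :: t) none
          = (i, PySem.Str.len w) :: pvRuns t (some (PySem.Str.len w)) from by
          simp only [pvRuns]; rw [if_pos (Option.some_ne_none _)],
        show pvPh2 ((i, PySem.Str.len w) :: pvRuns t (some (PySem.Str.len w))) d 0
          = pvPh2 (pvRuns t (some (PySem.Str.len w)))
              (if PySem.Str.len w > 0 then d.insert (PySem.Str.len w) i else d)
              (PySem.Str.len w) from by simp only [pvPh2]]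
    exact pvMain _ _ _

-- ===== VERDICT (by name: the statement is the Claim_ definition above) =====
theorem get_indexes_list_spec : Claim_equal_get_indexes_list := by
  unfold Claim_equal_get_indexes_list
  intro xs _
  show get_indexes_list xs = get_indexes_list_alt xs
  have hA : get_indexes_list xs
      = (pvGoA (PySem.List.enumerate xs) PySem.Dict.empty 0).items := by
    unfold get_indexes_list
    rw [pvFoldA_eq, ← PySem.List.enumerate_eq_map_pyRange xs ""]
  have hB : get_indexes_list_alt xs
      = (pvPh2 (pvRuns (PySem.List.enumerate xs) none) PySem.Dict.empty 0).items := by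
    unfold get_indexes_list_alt
    simp only [pvFold1_eq, pvFold2_eq, List.nil_append]
  rw [hA, hB, pvInit]
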